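-- pv_equiv track=rewrite | github.com/selfapplied/metanion | regex.py | find_line_positions
-- ===== SOURCE A (Python) =====
-- from typing import Dict, List, Tuple, Optional, Any
-- from collections import namedtuple
--
-- LinePoint = namedtuple('LinePoint', ['line_number', 'indent_level', 'content'])
--
-- def find_line_positions(text: str) -> List[LinePoint]:
--     """Find all line positions with their indent levels."""
--     lines = text.split('\n')
--     positions = []
--
--     for line_num, line in enumerate(lines):
--         indent_level = 0
--         for char in line:
--             if char == '\t':
--                 indent_level += 1
--             else:
--                 break
--
--         content = line.lstrip('\t')
--         positions.append(LinePoint(line_num, indent_level, content))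
--
--     return positions
-- ===== SOURCE B (Python) =====
-- from typing import Dict, List, Tuple, Optional, Any
-- from collections import namedtuple
--
-- LinePoint = namedtuple('LinePoint', ['line_number', 'indent_level', 'content'])
--
-- def find_line_positions(text: str) -> List[LinePoint]:
--     """Find all line positions with their indent levels.
--
--     Single character-level scan (state machine): no split(), no lstrip().
--     """
--     positions = []
--     line_num = 0
--     indent = 0
--     buf = []
--     at_start = True
--     for ch in text:
--         if ch == '\n':
--             positions.append(LinePoint(line_num, indent, ''.join(buf)))
--             line_num += 1
--             indent = 0
--             buf = []
--             at_start = True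
--         elif ch == '\t' and at_start:
--             indent += 1
--         else:
--             buf.append(ch)
--             at_start = False
--     positions.append(LinePoint(line_num, indent, ''.join(buf)))
--     return positions
-- ===== Notes on version B (the rewrite author's own statement) =====
-- stated objective: alternative
-- what changed: Replaces A's line split plus per-line leading-tab counting loop and tab strip with a single character-level state-machine scan over the whole text that emits a LinePoint at each line break, tracking line number, indent counter, content buffer and an at-start flag.
import Mathlib
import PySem

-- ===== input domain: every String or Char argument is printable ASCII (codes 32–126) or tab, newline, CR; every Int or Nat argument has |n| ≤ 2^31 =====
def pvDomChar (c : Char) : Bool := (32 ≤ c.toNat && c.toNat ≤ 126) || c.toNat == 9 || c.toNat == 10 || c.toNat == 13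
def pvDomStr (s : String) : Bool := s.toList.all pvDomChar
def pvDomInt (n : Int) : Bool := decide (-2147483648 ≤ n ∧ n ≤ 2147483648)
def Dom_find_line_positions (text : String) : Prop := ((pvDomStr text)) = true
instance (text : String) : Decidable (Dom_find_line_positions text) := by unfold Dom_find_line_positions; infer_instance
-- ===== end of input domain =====

-- B replaces A's line split + per-line tab-count loop + tab strip with one character-level
-- state-machine scan over the whole text — objective: alternative decomposition, same cost.

-- ===== PORT A =====
-- inner loop: for char in line: if char == '\t': indent_level += 1 else: break
def pvCountTabs : List Char → Int
  | [] => 0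
  | c :: cs => if c == '\t' then pvCountTabs cs + 1 else 0

-- line.lstrip('\t') ported by hand as dropWhile (· == '\t'): exact, since the strip set is the single char '\t'
def find_line_positions (text : String) : List (Int × Int × String) :=
  let lines := (PySem.Chars.splitOn text.toList ['\n']).map String.ofList  -- text.split('\n'), sep nonempty
  (PySem.List.enumerate lines 0).foldl
    (fun positions p =>
      let indent_level := pvCountTabs p.2.toList
      let content := String.ofList (p.2.toList.dropWhile (· == '\t'))
      positions ++ [(p.1, indent_level, content)]) []

-- ===== PORT B =====
-- state = (positions, line_num, indent, buf, at_start); ''.join(buf) = String.ofList buf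
def pvStepB (s : List (Int × Int × String) × Int × Int × List Char × Bool) (ch : Char) :
    List (Int × Int × String) × Int × Int × List Char × Bool :=
  let (positions, line_num, indent, buf, at_start) := s
  if ch = '\n' then (positions ++ [(line_num, indent, String.ofList buf)], line_num + 1, 0, [], true)
  else if ch = '\t' ∧ at_start = true then (positions, line_num, indent + 1, buf, at_start)
  else (positions, line_num, indent, buf ++ [ch], false)

def find_line_positions_alt (text : String) : List (Int × Int × String) :=
  let s := text.toList.foldl pvStepB ([], 0, 0, [], true)
  s.1 ++ [(s.2.1, s.2.2.1, String.ofList s.2.2.2.1)]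

-- ===== PRECONDITION & SPEC =====
def Spec_find_line_positions (text : String) (out : List (Int × Int × String)) : Prop := out = find_line_positions_alt text
instance (text : String) (out : List (Int × Int × String)) : Decidable (Spec_find_line_positions text out) := by unfold Spec_find_line_positions; infer_instance

-- ===== CLAIM (what is proved, stated in full; the proofs are below) =====
def Claim_equal_find_line_positions : Prop := ∀ (text : String), Dom_find_line_positions text → Spec_find_line_positions text (find_line_positions text)

-- ===== LEMMAS AND PROOFS =====

-- structural characterisation of Python's split on the one-char separator '\n'
def pvSplitNL : List Char → List (List Char)
  | [] => [[]]
  | c :: cs => if c = '\n' then [] :: pvSplitNL cs else (pvSplitNL cs).modifyHead (c :: ·)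

theorem pvSplitNL_ne_nil (l : List Char) : pvSplitNL l ≠ [] := by
  cases l with
  | nil => simp [pvSplitNL]
  | cons c cs =>
    simp only [pvSplitNL]
    split_ifs
    · simp
    · cases h : pvSplitNL cs with
      | nil => exact absurd h (pvSplitNL_ne_nil cs)
      | cons f r => simp

theorem pvSplitOn_go_eq (fuel : Nat) : ∀ (l cur : List Char) (acc : List (List Char)),
    l.length ≤ fuel →
    PySem.Chars.splitOn.go ['\n'] fuel l cur acc
      = acc.reverse ++ (pvSplitNL l).modifyHead (cur.reverse ++ ·) := by
  induction fuel with
  | zero =>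
    intro l cur acc h
    have : l = [] := List.eq_nil_of_length_eq_zero (Nat.le_zero.mp h)
    subst this
    simp [PySem.Chars.splitOn.go, pvSplitNL]
  | succ fuel ih =>
    intro l cur acc h
    cases l with
    | nil => simp [PySem.Chars.splitOn.go, pvSplitNL]
    | cons c rest =>
      simp only [PySem.Chars.splitOn.go]
      by_cases hc : c = '\n'
      · subst hc
        have hpre : List.isPrefixOf ['\n'] ('\n' :: rest) = true := by simp [List.isPrefixOf]
        rw [if_pos hpre]
        have := ih rest [] (cur.reverse :: acc) (by simpa using Nat.le_of_succ_le_succ h)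
        simp only [List.drop, List.length] at this ⊢
        rw [this]
        simp [pvSplitNL]
        cases hsp2 : pvSplitNL rest with
        | nil => exact absurd hsp2 (pvSplitNL_ne_nil rest)
        | cons f r => simp [List.modifyHead]
      · have hpre : List.isPrefixOf ['\n'] (c :: rest) = false := by
          simp only [List.isPrefixOf]
          simp [beq_eq_false_iff_ne.mpr (fun h => hc h.symm)]
        rw [if_neg (by simp [hpre])]
        have := ih rest (c :: cur) acc (by simpa using Nat.le_of_succ_le_succ h)
        rw [this]
        simp only [pvSplitNL, if_neg hc]
        cases hsp : pvSplitNL rest with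
        | nil => exact absurd hsp (pvSplitNL_ne_nil rest)
        | cons f r => simp [List.modifyHead]

theorem pvSplitOn_eq (l : List Char) :
    PySem.Chars.splitOn l ['\n'] = pvSplitNL l := by
  have := pvSplitOn_go_eq (l.length + 1) l [] [] (by omega)
  simp only [PySem.Chars.splitOn] at *
  rw [this]
  cases h : pvSplitNL l with
  | nil => exact absurd h (pvSplitNL_ne_nil l)
  | cons f r => simp [List.modifyHead]

-- the common normal form: one point per line, numbered from k
def pvPoints : List (List Char) → Int → List (Int × Int × String)
  | [], _ => []
  | x :: xs, k => (k, pvCountTabs x, String.ofList (x.dropWhile (· == '\t'))) :: pvPoints xs (k + 1)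

-- A's enumerate-map equals pvPoints
theorem pvA_points (lines : List (List Char)) : ∀ (k : Int),
    (PySem.List.enumerate (lines.map String.ofList) k).map
      (fun p => (p.1, pvCountTabs p.2.toList, String.ofList (p.2.toList.dropWhile (· == '\t'))))
      = pvPoints lines k := by
  induction lines with
  | nil => intro k; simp [pvPoints]
  | cons x xs ih =>
    intro k
    simp [pvPoints, ih]

-- what B's scan produces from an arbitrary mid-line state
def pvAssemble : List Char → Int → Int → List Char → Bool → List (Int × Int × String)
  | [], ln, ind, buf, _ => [(ln, ind, String.ofList buf)]
  | c :: cs, ln, ind, buf, st =>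
    if c = '\n' then (ln, ind, String.ofList buf) :: pvAssemble cs (ln + 1) 0 [] true
    else if c = '\t' ∧ st = true then pvAssemble cs ln (ind + 1) buf st
    else pvAssemble cs ln ind (buf ++ [c]) false

theorem pvB_run (l : List Char) : ∀ (pos : List (Int × Int × String)) (ln ind : Int)
    (buf : List Char) (st : Bool),
    (let s := l.foldl pvStepB (pos, ln, ind, buf, st)
     s.1 ++ [(s.2.1, s.2.2.1, String.ofList s.2.2.2.1)])
      = pos ++ pvAssemble l ln ind buf st := by
  induction l with
  | nil => intro pos ln ind buf st; simp [pvAssemble]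
  | cons c cs ih =>
    intro pos ln ind buf st
    simp only [List.foldl_cons, pvStepB, pvAssemble]
    by_cases hc : c = '\n'
    · simp only [if_pos hc, ih]
      simp
    · rw [if_neg hc, if_neg hc]
      by_cases ht : c = '\t' ∧ st = true
      · rw [if_pos ht, if_pos ht, ih]
      · rw [if_neg ht, if_neg ht, ih]

theorem pvAssemble_split (l : List Char) : ∀ (ln ind : Int) (buf : List Char) (st : Bool)
    (f : List Char) (r : List (List Char)),
    (st = true → buf = []) →
    pvSplitNL l = f :: r →
    pvAssemble l ln ind buf st
      = (if st then (ln, ind + pvCountTabs f, String.ofList (f.dropWhile (· == '\t')))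
         else (ln, ind, String.ofList (buf ++ f))) :: pvPoints r (ln + 1) := by
  induction l with
  | nil =>
    intro ln ind buf st f r hbuf hsp
    simp only [pvSplitNL] at hsp
    obtain ⟨hf, hr⟩ := List.cons_eq_cons.mp hsp
    subst hf; subst hr
    cases st with
    | true => simp [pvAssemble, pvPoints, hbuf rfl, pvCountTabs]
    | false => simp [pvAssemble, pvPoints]
  | cons c cs ih =>
    intro ln ind buf st f r hbuf hsp
    simp only [pvSplitNL] at hsp
    by_cases hc : c = '\n'
    · rw [if_pos hc] at hsp
      obtain ⟨hf, hr⟩ := List.cons_eq_cons.mp hsp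
      subst hf; subst hr
      -- pvSplitNL cs = f' :: r' for some f', r'
      cases hsp' : pvSplitNL cs with
      | nil => exact absurd hsp' (pvSplitNL_ne_nil cs)
      | cons f' r' =>
        have := ih (ln + 1) 0 [] true f' r' (fun _ => rfl) hsp'
        simp only [pvAssemble, if_pos hc, this]
        cases st with
        | true => simp [hbuf rfl, pvPoints, pvCountTabs]
        | false => simp [pvPoints]
    · rw [if_neg hc] at hsp
      cases hsp' : pvSplitNL cs with
      | nil => exact absurd hsp' (pvSplitNL_ne_nil cs)
      | cons f' r' =>
        rw [hsp'] at hsp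
        simp only [List.modifyHead] at hsp
        obtain ⟨hf, hr⟩ := List.cons_eq_cons.mp hsp
        subst hf; subst hr
        simp only [pvAssemble, if_neg hc]
        by_cases ht : c = '\t' ∧ st = true
        · rw [if_pos ht]
          have := ih ln (ind + 1) buf st f' r' hbuf hsp'
          rw [this]
          obtain ⟨hct, hst⟩ := ht
          subst hct; subst hst
          simp [pvCountTabs, List.dropWhile]
          ring_nf
        · rw [if_neg ht]
          have := ih ln ind (buf ++ [c]) false f' r' (by simp) hsp'
          rw [this]
          cases st with
          | true =>
            have hct : c ≠ '\t' := fun h => ht ⟨h, rfl⟩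
            have hb := hbuf rfl; subst hb
            have hcb : (c == '\t') = false := beq_eq_false_iff_ne.mpr hct
            simp [pvCountTabs, List.dropWhile, hcb]
          | false => simp

-- ===== VERDICT (by name: the statement is the Claim_ definition above) =====
theorem find_line_positions_spec : Claim_equal_find_line_positions := by
  intro text _
  simp only [Spec_find_line_positions, find_line_positions, find_line_positions_alt]
  rw [PySem.List.foldl_append_singleton_eq_map
    (fun p : Int × String => (p.1, pvCountTabs p.2.toList, String.ofList (p.2.toList.dropWhile (· == '\t'))))
    (PySem.List.enumerate ((PySem.Chars.splitOn text.toList ['\n']).map String.ofList) 0) []]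
  simp only [List.nil_append]
  rw [pvSplitOn_eq, pvA_points]
  rw [pvB_run]
  simp only [List.nil_append]
  cases hsp : pvSplitNL text.toList with
  | nil => exact absurd hsp (pvSplitNL_ne_nil text.toList)
  | cons f r =>
    rw [pvAssemble_split text.toList 0 0 [] true f r (fun _ => rfl) hsp]
    simp [pvPoints]
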